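-- pv_equiv track=rewrite | github.com/SakenW/TH-Suite | apps/mc_l10n/backend/infrastructure/scanners/jar_scanner.py | _analyze_assets_structure
-- ===== SOURCE A (Python) =====
-- def _analyze_assets_structure(
--     assets_files: list[str]
-- ) -> dict[str, dict[str, int]]:
--     """分析assets目录结构"""
--     structure = {}
--
--     for file_path in assets_files:
--         if file_path.endswith("/"):  # 跳过目录条目
--             continue
--
--         parts = file_path.split("/")
--         if len(parts) >= 3:  # assets/modid/type/...
--             mod_id = parts[1]
--             asset_type = parts[2]
--
--             if mod_id not in structure:
--                 structure[mod_id] = {}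
--
--             if asset_type not in structure[mod_id]:
--                 structure[mod_id][asset_type] = 0
--
--             structure[mod_id][asset_type] += 1
--
--     return structure
-- ===== SOURCE B (Python) =====
-- def _analyze_assets_structure(
--     assets_files: list[str]
-- ) -> dict[str, dict[str, int]]:
--     """Flat one-pass counter keyed by (mod_id, asset_type), then regroup into the nested dict."""
--     flat = {}
--     for file_path in assets_files:
--         if file_path.endswith("/"):
--             continue
--         parts = file_path.split("/")
--         if len(parts) >= 3:
--             key = (parts[1], parts[2])
--             flat[key] = flat.get(key, 0) + 1
--
--     structure = {}
--     for (mod_id, asset_type), count in flat.items():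
--         structure.setdefault(mod_id, {})[asset_type] = count
--     return structure
-- ===== Notes on version B (the rewrite author's own statement) =====
-- stated objective: alternative
-- what changed: B replaces A's incremental nested-dict accumulation (create-if-missing, zero-if-missing, then increment inside the loop) by a single flat counting pass keyed by (mod_id, asset_type) tuples followed by a separate regrouping pass over the flat counter's items that writes each final count once into the nested dict.
import Mathlib
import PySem

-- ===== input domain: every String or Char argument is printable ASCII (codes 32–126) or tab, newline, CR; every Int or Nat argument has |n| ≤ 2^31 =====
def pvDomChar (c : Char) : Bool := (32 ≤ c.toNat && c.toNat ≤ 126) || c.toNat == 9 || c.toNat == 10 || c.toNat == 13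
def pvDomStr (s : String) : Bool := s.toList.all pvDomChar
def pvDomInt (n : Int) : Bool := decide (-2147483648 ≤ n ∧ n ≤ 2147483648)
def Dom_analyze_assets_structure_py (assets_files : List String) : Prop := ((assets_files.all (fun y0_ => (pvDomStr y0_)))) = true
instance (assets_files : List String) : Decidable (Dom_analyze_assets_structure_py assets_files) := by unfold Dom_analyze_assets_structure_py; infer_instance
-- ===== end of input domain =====

-- B replaces A's incremental nested-dict accumulation by one flat count pass keyed by
-- (mod_id, asset_type) followed by a regrouping pass (objective: alternative decomposition).

-- ===== PORT A =====
def analyze_assets_structure_py (assets_files : List String) : List (String × List (String × Int)) :=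
  let structure_ : PySem.Dict String (PySem.Dict String Int) :=
    assets_files.foldl (fun structure_ file_path =>
      if PySem.Str.endswith file_path "/" then structure_   -- skip directory entries
      else
        let parts := (PySem.Str.split? file_path "/").getD []   -- sep "/" ≠ "": split? is always some
        if 3 ≤ parts.length then
          let mod_id := PySem.List.pyGetD parts 1 ""       -- parts[1]; in range since length ≥ 3
          let asset_type := PySem.List.pyGetD parts 2 ""   -- parts[2]; in range since length ≥ 3
          let structure_ :=
            if structure_.contains mod_id then structure_
            else structure_.insert mod_id PySem.Dict.empty
          let inner := structure_.getD mod_id PySem.Dict.empty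
          let inner :=
            if inner.contains asset_type then inner
            else inner.insert asset_type 0
          structure_.insert mod_id (inner.insert asset_type (inner.getD asset_type 0 + 1))
        else structure_) PySem.Dict.empty
  structure_.items.map (fun p => (p.1, p.2.items))

-- ===== PORT B =====
def analyze_assets_structure_py_alt (assets_files : List String) : List (String × List (String × Int)) :=
  let flat : PySem.Dict (String × String) Int :=
    assets_files.foldl (fun flat file_path =>
      if PySem.Str.endswith file_path "/" then flat
      else
        let parts := (PySem.Str.split? file_path "/").getD []
        if 3 ≤ parts.length then
          let key := (PySem.List.pyGetD parts 1 "", PySem.List.pyGetD parts 2 "")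
          flat.insert key (flat.getD key 0 + 1)
        else flat) PySem.Dict.empty
  let structure_ : PySem.Dict String (PySem.Dict String Int) :=
    flat.items.foldl (fun structure_ kc =>
      let d1 := structure_.setdefault kc.1.1 PySem.Dict.empty
      d1.insert kc.1.1 ((d1.getD kc.1.1 PySem.Dict.empty).insert kc.1.2 kc.2))
      PySem.Dict.empty
  structure_.items.map (fun p => (p.1, p.2.items))

-- ===== PRECONDITION & SPEC =====
def Spec_analyze_assets_structure_py (assets_files : List String) (out : List (String × List (String × Int))) : Prop := out = analyze_assets_structure_py_alt assets_files
instance (assets_files : List String) (out : List (String × List (String × Int))) : Decidable (Spec_analyze_assets_structure_py assets_files out) := by unfold Spec_analyze_assets_structure_py; infer_instance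

-- ===== CLAIM (what is proved, stated in full; the proofs are below) =====
def Claim_equal_analyze_assets_structure_py : Prop := ∀ (assets_files : List String), Dom_analyze_assets_structure_py assets_files → Spec_analyze_assets_structure_py assets_files (analyze_assets_structure_py assets_files)

-- ===== LEMMAS AND PROOFS =====

-- the (mod_id, asset_type) pairs one file path contributes (0 or 1 of them)
def pvPair (fp : String) : List (String × String) :=
  if PySem.Str.endswith fp "/" then []
  else
    let parts := (PySem.Str.split? fp "/").getD []
    if 3 ≤ parts.length then
      [(PySem.List.pyGetD parts 1 "", PySem.List.pyGetD parts 2 "")]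
    else []

-- normal form of one nested-dict update: write c at structure[p.1][p.2]
def pvSB (d : PySem.Dict String (PySem.Dict String Int)) (p : String × String) (c : Int) :
    PySem.Dict String (PySem.Dict String Int) :=
  d.insert p.1 ((d.getD p.1 PySem.Dict.empty).insert p.2 c)

-- regrouping fold: write cnt q at structure[q.1][q.2] for each q in qs
def pvBuild (cnt : String × String → Int) (qs : List (String × String))
    (d : PySem.Dict String (PySem.Dict String Int)) : PySem.Dict String (PySem.Dict String Int) :=
  qs.foldl (fun d q => pvSB d q (cnt q)) d

-- A's per-pair step (what A's loop body does once the pair is extracted)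
def pvStepA (d : PySem.Dict String (PySem.Dict String Int)) (p : String × String) :
    PySem.Dict String (PySem.Dict String Int) :=
  let d1 := if d.contains p.1 then d else d.insert p.1 PySem.Dict.empty
  let inner := d1.getD p.1 PySem.Dict.empty
  let inner1 := if inner.contains p.2 then inner else inner.insert p.2 0
  d1.insert p.1 (inner1.insert p.2 (inner1.getD p.2 0 + 1))

theorem pvBuild_cons (cnt : String × String → Int) (q : String × String)
    (qs : List (String × String)) (d : PySem.Dict String (PySem.Dict String Int)) :
    pvBuild cnt (q :: qs) d = pvBuild cnt qs (pvSB d q (cnt q)) := rfl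

-- a fold over the file list that handles each extracted pair with g equals the fold of g over the pair list
theorem pvFold_files {σ : Type} (g : σ → (String × String) → σ) (files : List String) (s : σ) :
    files.foldl (fun s fp =>
      if PySem.Str.endswith fp "/" then s
      else
        let parts := (PySem.Str.split? fp "/").getD []
        if 3 ≤ parts.length then
          g s (PySem.List.pyGetD parts 1 "", PySem.List.pyGetD parts 2 "")
        else s) s
    = (files.flatMap pvPair).foldl g s := by
  induction files generalizing s with
  | nil => rfl
  | cons fp fs ih =>
    simp only [List.foldl_cons, List.flatMap_cons, List.foldl_append]
    rw [ih]
    congr 1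
    unfold pvPair
    by_cases h1 : PySem.Chars.endswith fp.toList ['/'] = true
    · simp [PySem.Str.endswith, h1]
    · by_cases h2 : 3 ≤ ((PySem.Str.split? fp "/").getD []).length
      · simp [PySem.Str.endswith, h1, h2]
      · simp [PySem.Str.endswith, h1, h2]

-- two in-place-or-append writes at distinct keys commute when the first key is already present
theorem pv_insert_comm {κ ν : Type} [BEq κ] [LawfulBEq κ] (d : PySem.Dict κ ν) (k k' : κ)
    (v v' : ν) (hc : d.contains k = true) (hne : k' ≠ k) :
    (d.insert k v).insert k' v' = (d.insert k' v').insert k v := by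
  apply PySem.Dict.ext
  have hck : (d.insert k' v').contains k = true := by
    rw [PySem.Dict.contains_insert]; simp [hc]
  by_cases hc' : d.contains k' = true
  · have h1 : (d.insert k v).contains k' = true := by
      rw [PySem.Dict.contains_insert]; simp [hc']
    rw [PySem.Dict.items_insert_of_contains _ v' h1,
        PySem.Dict.items_insert_of_contains _ v hc,
        PySem.Dict.items_insert_of_contains _ v hck,
        PySem.Dict.items_insert_of_contains _ v' hc',
        List.map_map, List.map_map]
    apply List.map_congr_left
    intro p _
    by_cases hk : (p.1 == k) = true
    · have h2 : (p.1 == k') = false := by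
        rw [eq_of_beq hk]; simpa using Ne.symm hne
      have h3 : (k == k') = false := by simpa using Ne.symm hne
      simp [Function.comp, hk, h2, h3]
    · by_cases hk' : (p.1 == k') = true
      · have h3 : (k' == k) = false := by simpa using hne
        simp [Function.comp, hk, hk', h3]
      · simp [Function.comp, hk, hk']
  · have hcb : d.contains k' = false := by simpa using hc'
    have h1 : (d.insert k v).contains k' = false := by
      rw [PySem.Dict.contains_insert]; simp [hcb]; simpa using hne
    rw [PySem.Dict.items_insert_of_not_contains _ v' h1,
        PySem.Dict.items_insert_of_contains _ v hc,
        PySem.Dict.items_insert_of_contains _ v hck,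
        PySem.Dict.items_insert_of_not_contains _ v' hcb,
        List.map_append]
    have h3 : (k' == k) = false := by simpa using hne
    simp [h3]

-- B's regrouping step is pvSB
theorem pv_stepB_eq (d : PySem.Dict String (PySem.Dict String Int)) (k : String × String) (c : Int) :
    (let d1 := d.setdefault k.1 PySem.Dict.empty
     d1.insert k.1 ((d1.getD k.1 PySem.Dict.empty).insert k.2 c)) = pvSB d k c := by
  by_cases h : d.contains k.1 = true
  · simp only [PySem.Dict.setdefault_of_contains _ _ h]; rfl
  · have hb : d.contains k.1 = false := by simpa using h
    simp only [PySem.Dict.setdefault_of_not_contains _ _ hb]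
    simp only [PySem.Dict.getD_insert_self]
    rw [PySem.Dict.insert_insert_self]
    unfold pvSB
    rw [PySem.Dict.getD_of_not_contains _ _ hb]

-- A's step writes current count + 1
theorem pv_stepA_eq (d : PySem.Dict String (PySem.Dict String Int)) (p : String × String) :
    pvStepA d p = pvSB d p ((d.getD p.1 PySem.Dict.empty).getD p.2 0 + 1) := by
  unfold pvStepA pvSB
  by_cases h : d.contains p.1 = true
  · simp only [h, if_true]
    by_cases h2 : (d.getD p.1 PySem.Dict.empty).contains p.2 = true
    · simp only [h2, if_true]
    · have hb : (d.getD p.1 PySem.Dict.empty).contains p.2 = false := by simpa using h2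
      simp only [hb, Bool.false_eq_true, if_false]
      rw [PySem.Dict.getD_insert_self, PySem.Dict.insert_insert_self,
          PySem.Dict.getD_of_not_contains _ _ hb]
  · have hb : d.contains p.1 = false := by simpa using h
    simp only [hb, Bool.false_eq_true, if_false]
    rw [PySem.Dict.getD_insert_self]
    simp only [PySem.Dict.contains_empty, Bool.false_eq_true, if_false]
    rw [PySem.Dict.getD_insert_self, PySem.Dict.insert_insert_self,
        PySem.Dict.insert_insert_self, PySem.Dict.getD_of_not_contains _ _ hb,
        PySem.Dict.getD_empty]

theorem pv_getD_sB (d : PySem.Dict String (PySem.Dict String Int)) (p : String × String)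
    (c : Int) (m : String) :
    (pvSB d p c).getD m PySem.Dict.empty
      = if p.1 = m then (d.getD p.1 PySem.Dict.empty).insert p.2 c
        else d.getD m PySem.Dict.empty := by
  unfold pvSB
  rw [PySem.Dict.getD_insert]
  by_cases h : p.1 = m
  · simp [h]
  · simp [h, Ne.symm h]

theorem pv_lookup_build (cnt : String × String → Int) (qs : List (String × String))
    (d : PySem.Dict String (PySem.Dict String Int)) (m t : String) :
    ((pvBuild cnt qs d).getD m PySem.Dict.empty).getD t 0
      = if (m, t) ∈ qs then cnt (m, t) else ((d.getD m PySem.Dict.empty).getD t 0) := by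
  induction qs generalizing d with
  | nil => simp [pvBuild]
  | cons q qs ih =>
    obtain ⟨q1, q2⟩ := q
    simp only [pvBuild, List.foldl_cons] at *
    rw [ih]
    by_cases hmem : (m, t) ∈ qs
    · simp [hmem]
    · simp only [hmem, if_false]
      rw [pv_getD_sB]
      by_cases h1 : q1 = m
      · subst h1
        rw [if_pos rfl, PySem.Dict.getD_insert]
        by_cases h2 : t = q2
        · subst h2; simp
        · rw [if_neg h2]
          have hnm : (q1, t) ∉ (q1, q2) :: qs := by
            simp [hmem]; intro h; exact h2 h
          rw [if_neg hnm]
      · have hnm : (m, t) ∉ (q1, q2) :: qs := by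
          simp [hmem]; intro h _; exact h1 h.symm
        rw [if_neg h1, if_neg hnm]

theorem pv_build_congr (cnt₁ cnt₂ : String × String → Int) (qs : List (String × String))
    (d : PySem.Dict String (PySem.Dict String Int)) (h : ∀ q ∈ qs, cnt₁ q = cnt₂ q) :
    pvBuild cnt₁ qs d = pvBuild cnt₂ qs d := by
  induction qs generalizing d with
  | nil => rfl
  | cons q qs ih =>
    rw [pvBuild_cons, pvBuild_cons, h q (by simp), ih _ (fun q hq => h q (by simp [hq]))]

theorem pv_sB_comm (d : PySem.Dict String (PySem.Dict String Int)) (p q : String × String)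
    (b c : Int) (hq : q ≠ p) (h1 : d.contains p.1 = true)
    (h2 : (d.getD p.1 PySem.Dict.empty).contains p.2 = true) :
    pvSB (pvSB d q c) p b = pvSB (pvSB d p b) q c := by
  obtain ⟨p1, p2⟩ := p
  obtain ⟨q1, q2⟩ := q
  simp only at h1 h2
  by_cases hk : q1 = p1
  · subst hk
    have hq2 : q2 ≠ p2 := by rintro rfl; exact hq rfl
    simp only [pvSB, PySem.Dict.getD_insert_self, PySem.Dict.insert_insert_self]
    rw [pv_insert_comm _ _ _ _ _ h2 hq2]
  · simp only [pvSB]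
    rw [PySem.Dict.getD_insert_of_ne _ _ _ (fun h => hk h.symm),
        PySem.Dict.getD_insert_of_ne _ _ _ hk,
        pv_insert_comm _ _ _ _ _ h1 hk]

theorem pv_contains_sB (d : PySem.Dict String (PySem.Dict String Int)) (q : String × String)
    (c : Int) (p : String × String) (h1 : d.contains p.1 = true)
    (h2 : (d.getD p.1 PySem.Dict.empty).contains p.2 = true) :
    (pvSB d q c).contains p.1 = true ∧
      ((pvSB d q c).getD p.1 PySem.Dict.empty).contains p.2 = true := by
  constructor
  · unfold pvSB; rw [PySem.Dict.contains_insert]; simp [h1]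
  · rw [pv_getD_sB]
    by_cases hk : q.1 = p.1
    · rw [if_pos hk, PySem.Dict.contains_insert, hk]
      simp [h2]
    · simp [hk, h2]

theorem pv_sB_overwrite (d : PySem.Dict String (PySem.Dict String Int)) (p : String × String)
    (a b : Int) : pvSB (pvSB d p a) p b = pvSB d p b := by
  simp only [pvSB, PySem.Dict.getD_insert_self, PySem.Dict.insert_insert_self]

theorem pv_sB_build_comm (cnt : String × String → Int) (qs : List (String × String))
    (d : PySem.Dict String (PySem.Dict String Int)) (p : String × String) (b : Int)
    (hp : p ∉ qs) (h1 : d.contains p.1 = true)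
    (h2 : (d.getD p.1 PySem.Dict.empty).contains p.2 = true) :
    pvSB (pvBuild cnt qs d) p b = pvBuild cnt qs (pvSB d p b) := by
  induction qs generalizing d with
  | nil => rfl
  | cons q qs ih =>
    have hqp : q ≠ p := fun h => hp (by simp [h])
    have hc := pv_contains_sB d q (cnt q) p h1 h2
    rw [pvBuild_cons, pvBuild_cons, ih _ (fun h => hp (by simp [h])) hc.1 hc.2,
        pv_sB_comm _ _ _ _ _ hqp h1 h2]

theorem pv_build_bump (cnt cnt' : String × String → Int) (qs : List (String × String))
    (d : PySem.Dict String (PySem.Dict String Int)) (p : String × String)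
    (hnd : qs.Nodup) (hp : p ∈ qs) (hagree : ∀ q ∈ qs, q ≠ p → cnt' q = cnt q) :
    pvBuild cnt' qs d = pvSB (pvBuild cnt qs d) p (cnt' p) := by
  induction qs generalizing d with
  | nil => simp at hp
  | cons q qs ih =>
    by_cases hqp : q = p
    · subst hqp
      have hnotin : q ∉ qs := (List.nodup_cons.mp hnd).1
      have hcon1 : (pvSB d q (cnt q)).contains q.1 = true := by
        unfold pvSB; exact PySem.Dict.contains_insert_self _ _ _
      have hcon2 : ((pvSB d q (cnt q)).getD q.1 PySem.Dict.empty).contains q.2 = true := by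
        unfold pvSB
        rw [PySem.Dict.getD_insert_self]
        exact PySem.Dict.contains_insert_self _ _ _
      rw [pvBuild_cons, pvBuild_cons,
          pv_build_congr cnt' cnt qs _ (fun r hr => hagree r (by simp [hr]) (fun h => hnotin (h ▸ hr))),
          pv_sB_build_comm cnt qs _ q (cnt' q) hnotin hcon1 hcon2, pv_sB_overwrite]
    · have hp' : p ∈ qs := by
        rcases List.mem_cons.mp hp with h | h
        · exact absurd h.symm hqp
        · exact h
      rw [pvBuild_cons, pvBuild_cons, hagree q (by simp) hqp,
          ih _ (List.nodup_cons.mp hnd).2 hp' (fun r hr hne => hagree r (by simp [hr]) hne)]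

-- main: A's accumulation over the pair list equals the grouped counts of the whole pair list
theorem pv_main (ps : List (String × String)) :
    ps.foldl pvStepA PySem.Dict.empty
      = pvBuild (fun q => (ps.count q : Int)) (PySem.Set.ofList ps) PySem.Dict.empty := by
  induction ps using List.reverseRecOn with
  | nil => rfl
  | append_singleton ps p ih =>
    rw [List.foldl_append, List.foldl_cons, List.foldl_nil, ih, pv_stepA_eq,
        pv_lookup_build, PySem.Set.ofList_append_singleton]
    by_cases hp : p ∈ ps
    · have hmem : (p.1, p.2) ∈ PySem.Set.ofList ps := by
        rw [PySem.Set.mem_ofList]; simpa using hp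
      rw [if_pos hmem, PySem.Set.add_of_mem (by simpa using hmem)]
      rw [pv_build_bump (fun q => (ps.count q : Int)) (fun q => ((ps ++ [p]).count q : Int))
            (PySem.Set.ofList ps) PySem.Dict.empty p (PySem.Set.nodup_ofList ps)
            (by rw [PySem.Set.mem_ofList]; exact hp)
            (fun q hq hne => by simp [List.count_append, Ne.symm hne])]
      congr 1
      simp [List.count_append]
    · have hmem : ¬ (p.1, p.2) ∈ PySem.Set.ofList ps := by
        rw [PySem.Set.mem_ofList]; simpa using hp
      rw [if_neg hmem, PySem.Set.add_of_not_mem (by simpa using hmem)]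
      have hsplit : pvBuild (fun q => ((ps ++ [p]).count q : Int)) (PySem.Set.ofList ps ++ [p]) PySem.Dict.empty
          = pvSB (pvBuild (fun q => ((ps ++ [p]).count q : Int)) (PySem.Set.ofList ps) PySem.Dict.empty) p ((ps ++ [p]).count p : Int) := by
        simp [pvBuild, List.foldl_append]
      rw [hsplit,
          pv_build_congr (fun q => ((ps ++ [p]).count q : Int)) (fun q => (ps.count q : Int))
            (PySem.Set.ofList ps) PySem.Dict.empty
            (fun q hq => by
              have : q ≠ p := fun h => hp (h ▸ (PySem.Set.mem_ofList ps q).mp hq)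
              simp [List.count_append, Ne.symm this])]
      congr 1
      have h0 : ps.count p = 0 := List.count_eq_zero.mpr hp
      simp [List.count_append, h0]

theorem pv_A_eq (files : List String) :
    analyze_assets_structure_py files
      = ((files.flatMap pvPair).foldl pvStepA PySem.Dict.empty).items.map (fun p => (p.1, p.2.items)) := by
  exact congrArg (fun d : PySem.Dict String (PySem.Dict String Int) => d.items.map (fun p => (p.1, p.2.items)))
    (pvFold_files pvStepA files PySem.Dict.empty)

theorem pv_regroup (items : List ((String × String) × Int))
    (d : PySem.Dict String (PySem.Dict String Int)) :
    items.foldl (fun structure_ kc =>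
      let d1 := structure_.setdefault kc.1.1 PySem.Dict.empty
      d1.insert kc.1.1 ((d1.getD kc.1.1 PySem.Dict.empty).insert kc.1.2 kc.2)) d
    = items.foldl (fun s kc => pvSB s kc.1 kc.2) d := by
  induction items generalizing d with
  | nil => rfl
  | cons kc items ih =>
    rw [List.foldl_cons, List.foldl_cons, pv_stepB_eq, ih]

theorem pv_B_eq (files : List String) :
    analyze_assets_structure_py_alt files
      = (pvBuild (fun q => ((files.flatMap pvPair).count q : Int)) (PySem.Set.ofList (files.flatMap pvPair)) PySem.Dict.empty).items.map (fun p => (p.1, p.2.items)) := by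
  have h1 : analyze_assets_structure_py_alt files
      = ((PySem.Dict.counter (files.flatMap pvPair)).items.foldl (fun structure_ kc =>
          let d1 := structure_.setdefault kc.1.1 PySem.Dict.empty
          d1.insert kc.1.1 ((d1.getD kc.1.1 PySem.Dict.empty).insert kc.1.2 kc.2))
          PySem.Dict.empty).items.map (fun p => (p.1, p.2.items)) := by
    unfold analyze_assets_structure_py_alt
    rw [show (files.foldl (fun flat file_path =>
      if PySem.Str.endswith file_path "/" then flat
      else
        let parts := (PySem.Str.split? file_path "/").getD []
        if 3 ≤ parts.length then
          let key := (PySem.List.pyGetD parts 1 "", PySem.List.pyGetD parts 2 "")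
          flat.insert key (flat.getD key 0 + 1)
        else flat) (PySem.Dict.empty : PySem.Dict (String × String) Int))
      = PySem.Dict.counter (files.flatMap pvPair) from by
        exact (pvFold_files (σ := PySem.Dict (String × String) Int) (fun fl k => fl.insert k (fl.getD k 0 + 1)) files PySem.Dict.empty).trans
          (PySem.Dict.foldl_insert_getD_add_one_eq_counter _)]
  rw [h1, pv_regroup, PySem.Dict.items_counter, List.foldl_map]
  rfl

-- ===== VERDICT (by name: the statement is the Claim_ definition above) =====
theorem analyze_assets_structure_py_spec : Claim_equal_analyze_assets_structure_py := by
  intro assets_files _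
  unfold Spec_analyze_assets_structure_py
  rw [pv_A_eq, pv_main, pv_B_eq]
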